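-- pv_equiv track=rewrite | github.com/Dragonfire94/vedic-ai | backend/report_engine.py | _fragment_text_length
-- ===== SOURCE A (Python) =====
-- from typing import Any
--
-- def _fragment_text_length(fragment: dict[str, Any]) -> tuple[int, int]:
--     parts: list[str] = []
--     for field in ("title", "summary", "analysis", "implication", "examples"):
--         value = fragment.get(field)
--         if isinstance(value, str) and value.strip():
--             parts.append(value.strip())
--     combined = "\n".join(parts)
--     return len(combined), len(combined.split())
-- ===== SOURCE B (Python) =====
-- from typing import Any
--
-- def _fragment_text_length(fragment: dict[str, Any]) -> tuple[int, int]: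
--     chars = 0
--     words = 0
--     count = 0
--     for field in ("title", "summary", "analysis", "implication", "examples"):
--         value = fragment.get(field)
--         if isinstance(value, str):
--             s = value.strip()
--             if s:
--                 chars += len(s)
--                 words += len(s.split())
--                 count += 1
--     return chars + max(0, count - 1), words
-- ===== Notes on version B (the rewrite author's own statement) =====
-- stated objective: alternative
-- what changed: Instead of collecting the stripped fields into a list, joining them with newlines and measuring the combined string, B keeps two integer accumulators (plus a contributing-field counter) in a single pass and adds count-1 for the newline separators.
import Mathlib
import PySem

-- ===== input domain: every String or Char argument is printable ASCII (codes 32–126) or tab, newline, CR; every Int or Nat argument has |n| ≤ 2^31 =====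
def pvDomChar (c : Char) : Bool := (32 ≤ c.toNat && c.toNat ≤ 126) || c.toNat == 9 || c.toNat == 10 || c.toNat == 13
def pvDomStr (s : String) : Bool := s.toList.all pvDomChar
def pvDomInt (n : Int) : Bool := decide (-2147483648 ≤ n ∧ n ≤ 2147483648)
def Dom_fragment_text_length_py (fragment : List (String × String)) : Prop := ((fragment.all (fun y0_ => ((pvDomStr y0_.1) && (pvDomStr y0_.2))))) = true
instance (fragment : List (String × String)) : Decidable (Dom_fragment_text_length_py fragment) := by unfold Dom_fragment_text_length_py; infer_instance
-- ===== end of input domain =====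

-- B replaces A's build-list / join / measure-the-combined-string pipeline by a single pass
-- with two integer accumulators (chars, words) plus a contributing-field counter whose
-- count-1 accounts for the newline separators; same return value, no speed claim.

-- ===== PORT A =====
-- the five field names A iterates over
def pvFields : List String := ["title", "summary", "analysis", "implication", "examples"]

-- A's loop body: append value.strip() when the field is present and its strip is truthy
def pvStepA (d : PySem.Dict String String) (parts : List String) (field : String) : List String :=
  match d.get? field with
  | some value => if PySem.Str.strip value ≠ "" then parts ++ [PySem.Str.strip value] else parts
  | none => parts

def fragment_text_length_py (fragment : List (String × String)) : Int × Int :=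
  let parts := pvFields.foldl (pvStepA (PySem.Dict.ofList fragment)) []
  let combined := PySem.Str.join "\n" parts
  (PySem.Str.len combined, ((PySem.Str.split₀ combined).length : Int))

-- ===== PORT B =====
-- B's loop body: state = (chars, words, count); add len/word-count of the stripped field
def pvStepB (d : PySem.Dict String String) (st : Int × Int × Int) (field : String) : Int × Int × Int :=
  match d.get? field with
  | some value =>
      let s := PySem.Str.strip value
      if s ≠ "" then (st.1 + PySem.Str.len s, st.2.1 + ((PySem.Str.split₀ s).length : Int), st.2.2 + 1)
      else st
  | none => st

def fragment_text_length_py_alt (fragment : List (String × String)) : Int × Int :=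
  let st := pvFields.foldl (pvStepB (PySem.Dict.ofList fragment)) (0, 0, 0)
  (st.1 + max 0 (st.2.2 - 1), st.2.1)

-- ===== PRECONDITION & SPEC =====
def Spec_fragment_text_length_py (fragment : List (String × String)) (out : Int × Int) : Prop := out = fragment_text_length_py_alt fragment
instance (fragment : List (String × String)) (out : Int × Int) : Decidable (Spec_fragment_text_length_py fragment out) := by unfold Spec_fragment_text_length_py; infer_instance

-- ===== CLAIM (what is proved, stated in full; the proofs are below) =====
def Claim_equal_fragment_text_length_py : Prop := ∀ (fragment : List (String × String)), Dom_fragment_text_length_py fragment → Spec_fragment_text_length_py fragment (fragment_text_length_py fragment)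

-- ===== LEMMAS AND PROOFS =====

-- B's (chars, words, count) state as a function of A's parts list
def pvMeasure (parts : List String) : Int × Int × Int :=
  ((parts.map PySem.Str.len).sum,
   (parts.map (fun p => ((PySem.Str.split₀ p).length : Int))).sum,
   (parts.length : Int))

lemma pvStep_comm (d : PySem.Dict String String) (parts : List String) (f : String) :
    pvStepB d (pvMeasure parts) f = pvMeasure (pvStepA d parts f) := by
  unfold pvStepA pvStepB
  cases d.get? f with
  | none => rfl
  | some v =>
      dsimp only
      by_cases h : PySem.Str.strip v ≠ ""
      · rw [if_pos h, if_pos h]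
        unfold pvMeasure
        simp only [List.map_append, List.sum_append, List.map_cons, List.map_nil,
          List.sum_cons, List.sum_nil, List.length_append, List.length_cons, List.length_nil,
          Nat.cast_add, Nat.cast_one, add_zero, zero_add]
      · rw [if_neg h, if_neg h]

lemma pvFold_comm (d : PySem.Dict String String) :
    ∀ (fs : List String) (parts : List String),
      fs.foldl (pvStepB d) (pvMeasure parts) = pvMeasure (fs.foldl (pvStepA d) parts) := by
  intro fs
  induction fs with
  | nil => intro parts; rfl
  | cons f rest ih =>
      intro parts
      simp only [List.foldl_cons, pvStep_comm, ih]

-- split₀.go: the output accumulator can be pulled out front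
lemma pvGo_acc (s : List Char) :
    ∀ (cur : List Char) (acc : List (List Char)),
      PySem.Chars.split₀.go s cur acc = acc.reverse ++ PySem.Chars.split₀.go s cur [] := by
  induction s with
  | nil =>
      intro cur acc
      by_cases h : cur.isEmpty <;> simp [PySem.Chars.split₀.go, h]
  | cons c rest ih =>
      intro cur acc
      by_cases hc : PySem.Chars.isspace c
      · by_cases hcur : cur.isEmpty
        · simp only [PySem.Chars.split₀.go, hc, hcur, if_true]
          exact ih [] acc
        · simp only [PySem.Chars.split₀.go, hc, hcur, if_true]
          rw [ih [] (cur.reverse :: acc), ih [] [cur.reverse]]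
          simp
      · simp only [PySem.Chars.split₀.go, hc]
        exact ih (c :: cur) acc

-- split₀.go across a whitespace character: the left half is finished off first
lemma pvGo_space_append (c : Char) (hc : PySem.Chars.isspace c = true) (b : List Char) :
    ∀ (a : List Char) (cur : List Char) (acc : List (List Char)),
      PySem.Chars.split₀.go (a ++ c :: b) cur acc
        = PySem.Chars.split₀.go b [] (PySem.Chars.split₀.go a cur acc).reverse := by
  intro a
  induction a with
  | nil =>
      intro cur acc
      by_cases hcur : cur.isEmpty <;>
        simp [PySem.Chars.split₀.go, hc, hcur]
  | cons d rest ih =>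
      intro cur acc
      by_cases hd : PySem.Chars.isspace d
      · by_cases hcur : cur.isEmpty <;>
          simp only [List.cons_append, PySem.Chars.split₀.go, hd, hcur, if_true] <;>
          exact ih _ _
      · simp only [List.cons_append, PySem.Chars.split₀.go, hd]
        exact ih _ _

-- splitting on whitespace distributes over a whitespace join point
lemma pvSplit₀_append_space (c : Char) (hc : PySem.Chars.isspace c = true) (a b : List Char) :
    PySem.Chars.split₀ (a ++ c :: b) = PySem.Chars.split₀ a ++ PySem.Chars.split₀ b := by
  unfold PySem.Chars.split₀
  rw [pvGo_space_append c hc b a [] [], pvGo_acc b]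
  simp

-- word list of a newline-join = concatenation of the parts' word lists
lemma pvSplit₀_join (ps : List (List Char)) :
    PySem.Chars.split₀ (PySem.Chars.join ['\n'] ps) = (ps.map PySem.Chars.split₀).flatten := by
  induction ps with
  | nil => simp [PySem.Chars.join_nil, PySem.Chars.split₀, PySem.Chars.split₀.go]
  | cons p rest ih =>
      cases rest with
      | nil => simp [PySem.Chars.join_singleton]
      | cons q rs =>
          rw [PySem.Chars.join_cons_cons]
          have : p ++ ['\n'] ++ PySem.Chars.join ['\n'] (q :: rs)
              = p ++ '\n' :: PySem.Chars.join ['\n'] (q :: rs) := by simp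
          rw [this, pvSplit₀_append_space '\n' (by decide), ih]
          simp

-- length of a newline-join = sum of lengths + (number of parts - 1)
lemma pvLen_join (ps : List (List Char)) :
    (PySem.Chars.join ['\n'] ps).length = (ps.map List.length).sum + (ps.length - 1) := by
  induction ps with
  | nil => simp [PySem.Chars.join_nil]
  | cons p rest ih =>
      cases rest with
      | nil => simp [PySem.Chars.join_singleton]
      | cons q rs =>
          rw [PySem.Chars.join_cons_cons]
          simp [ih]
          omega

lemma pvLen_split₀_str (s : String) :
    (PySem.Str.split₀ s).length = (PySem.Chars.split₀ s.toList).length := by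
  rw [← PySem.Str.split₀_map_toList, List.length_map]

-- integer sums of char counts / word counts over the parts, as Nat sums cast to Int
lemma pvSum_len (parts : List String) :
    (parts.map PySem.Str.len).sum = (((parts.map String.toList).map List.length).sum : Int) := by
  induction parts with
  | nil => rfl
  | cons p rest ih => simp [PySem.Str.len_eq, ih]

lemma pvSum_words (parts : List String) :
    (parts.map (fun p => ((PySem.Str.split₀ p).length : Int))).sum
      = ((((parts.map String.toList).map PySem.Chars.split₀).map List.length).sum : Int) := by
  induction parts with
  | nil => rfl
  | cons p rest ih =>
      simp only [List.map_cons, List.sum_cons, ih, Nat.cast_add]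
      rw [pvLen_split₀_str]

-- ===== VERDICT (by name: the statement is the Claim_ definition above) =====
theorem fragment_text_length_py_spec : Claim_equal_fragment_text_length_py := by
  intro fragment _
  unfold Spec_fragment_text_length_py fragment_text_length_py fragment_text_length_py_alt
  dsimp only
  have h0 : pvMeasure [] = ((0 : Int), (0 : Int), (0 : Int)) := rfl
  rw [← h0, pvFold_comm (PySem.Dict.ofList fragment) pvFields []]
  set parts := pvFields.foldl (pvStepA (PySem.Dict.ofList fragment)) [] with hparts
  unfold pvMeasure
  have hnl : ("\n" : String).toList = ['\n'] := by decide
  have hwords : ((PySem.Str.split₀ (PySem.Str.join "\n" parts)).length : Int)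
      = (parts.map (fun p => ((PySem.Str.split₀ p).length : Int))).sum := by
    rw [pvSum_words, pvLen_split₀_str, PySem.Str.toList_join, hnl, pvSplit₀_join]
    simp [List.length_flatten]
  have hchars : PySem.Str.len (PySem.Str.join "\n" parts)
      = (parts.map PySem.Str.len).sum + max 0 ((parts.length : Int) - 1) := by
    rw [PySem.Str.len_eq, PySem.Str.toList_join, hnl, pvLen_join, pvSum_len]
    have hlen : (parts.map String.toList).length = parts.length := by simp
    rw [hlen]
    omega
  rw [hwords, hchars]
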